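-- pv_equiv track=rewrite | github.com/cfpb/regulations-parser | regparser/tree/appendix/generic.py | find_next_segment
-- ===== SOURCE A (Python) =====
-- def is_title_case(line):
--     """Determine if a line is title-case (i.e. the first letter of every
--     word is upper-case. More readable than the equivalent all([]) form."""
--     for word in line.split(u' '):
--         if len(word) > 0 and len(word) > 3 and word[0] != word[0].upper():
--             return False
--     return True
--
-- def find_next_segment(text):
--     """Find the start/end of the next segment. A segment for the generic
--     appendix parser is something separated by a title-ish line (a short line
--     with title-case words)."""
--     lines = text.split("\n")
--     for i in range(len(lines) - 1):
--         lines[i] = lines[i] + "\n"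
--     start = 0
--     end = 0
--     found_start = False
--     for line in lines + ["Placeholder Title"]:
--         if len(line.strip()) > 0 and len(line) < 100 and is_title_case(line):
--             if found_start:
--                 return (start, end)
--             else:
--                 found_start = True
--         end += len(line)
--         if not found_start:
--             start += len(line)
-- ===== SOURCE B (Python) =====
-- def is_title_case(line):
--     """Determine if a line is title-case (i.e. the first letter of every
--     word is upper-case. More readable than the equivalent all([]) form."""
--     for word in line.split(u' '):
--         if len(word) > 0 and len(word) > 3 and word[0] != word[0].upper():
--             return False
--     return True
--
-- def find_next_segment(text):
--     """Offset-table reformulation: build the line list (with '\n' re-appended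
--     and the sentinel title), the prefix-offset table, then pick the offsets of
--     the first two title-ish lines."""
--     parts = text.split("\n")
--     lines = [l + "\n" for l in parts[:-1]] + parts[-1:] + ["Placeholder Title"]
--     offsets = [0]
--     for l in lines:
--         offsets.append(offsets[-1] + len(l))
--     titles = [off for off, line in zip(offsets, lines)
--               if len(line.strip()) > 0 and len(line) < 100 and is_title_case(line)]
--     if len(titles) >= 2:
--         return (titles[0], titles[1])
--     return None
-- ===== Notes on version B (the rewrite author's own statement) =====
-- stated objective: alternative
-- what changed: Replaced A's single stateful scan (start/end/found_start accumulators with an early return) by an offset-table decomposition: build the line list and a prefix-offset table, filter the title-ish lines by zipping offsets with lines, and return the first two offsets if they exist.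
import Mathlib
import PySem

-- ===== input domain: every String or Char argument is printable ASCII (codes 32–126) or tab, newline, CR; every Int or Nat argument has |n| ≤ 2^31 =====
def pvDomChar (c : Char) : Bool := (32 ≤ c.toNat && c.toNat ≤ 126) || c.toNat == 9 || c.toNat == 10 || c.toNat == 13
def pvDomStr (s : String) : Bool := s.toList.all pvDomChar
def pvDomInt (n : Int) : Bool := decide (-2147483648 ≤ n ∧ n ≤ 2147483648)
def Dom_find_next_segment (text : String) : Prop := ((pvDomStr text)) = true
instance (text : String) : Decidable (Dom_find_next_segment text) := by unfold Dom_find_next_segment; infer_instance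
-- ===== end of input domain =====

-- B replaces A's stateful scan (start/end/found_start with an early return) by an
-- offset-table decomposition: build the line list once, a prefix-offset table,
-- filter the title-ish lines and pick the first two offsets (objective: alternative).

-- shared by both ports: the is_title_case helper (identical in both Pythons)
def pvTitleWords : List (List Char) → Bool
  | [] => true
  | w :: ws =>
    if 0 < w.length ∧ 3 < w.length ∧ w.headD ' ' ≠ PySem.Chars.upperChar (w.headD ' ') then
      false
    else pvTitleWords ws

def pvIsTitleCase (line : List Char) : Bool :=
  pvTitleWords (PySem.Chars.splitOn line [' '])

-- the qualifying test 'len(line.strip()) > 0 and len(line) < 100 and is_title_case(line)'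
-- (textually identical in both Pythons)
def pvQual (l : List Char) : Bool :=
  decide (0 < (PySem.Chars.strip l).length) && decide (l.length < 100) && pvIsTitleCase l

def pvPlaceholder : List Char := "Placeholder Title".toList

-- ===== PORT A =====
-- 'for i in range(len(lines) - 1): lines[i] = lines[i] + "\n"'
def pvAddNL : List (List Char) → List (List Char)
  | [] => []
  | [l] => [l]
  | l :: ls => (l ++ ['\n']) :: pvAddNL ls

-- the main for-loop with start/end/found_start and the early return
def pvSegLoop : List (List Char) → Int → Int → Bool → Option (Int × Int)
  | [], _, _, _ => none
  | line :: rest, start, stop, found =>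
    if pvQual line then
      if found then some (start, stop)
      else pvSegLoop rest start (stop + (line.length : Int)) true
    else
      pvSegLoop rest (if found then start else start + (line.length : Int))
        (stop + (line.length : Int)) found

def find_next_segment (text : String) : Option (Int × Int) :=
  pvSegLoop (pvAddNL (PySem.Chars.splitOn text.toList ['\n']) ++ [pvPlaceholder]) 0 0 false

-- ===== PORT B =====
def find_next_segment_alt (text : String) : Option (Int × Int) :=
  let parts := PySem.Chars.splitOn text.toList ['\n']
  let lines := (PySem.List.slice parts none (some (-1))).map (fun l => l ++ ['\n'])
      ++ PySem.List.slice parts (some (-1)) none ++ [pvPlaceholder]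
  let offsets := lines.foldl
      (fun offs l => offs ++ [offs.getLastD 0 + (l.length : Int)]) [(0 : Int)]
  let titles := ((offsets.zip lines).filter (fun p => pvQual p.2)).map Prod.fst
  match titles with
  | a :: b :: _ => some (a, b)
  | _ => none

-- ===== PRECONDITION & SPEC =====
def Spec_find_next_segment (text : String) (out : Option (Int × Int)) : Prop := out = find_next_segment_alt text
instance (text : String) (out : Option (Int × Int)) : Decidable (Spec_find_next_segment text out) := by unfold Spec_find_next_segment; infer_instance

-- ===== CLAIM (what is proved, stated in full; the proofs are below) =====
def Claim_equal_find_next_segment : Prop := ∀ (text : String), Dom_find_next_segment text → Spec_find_next_segment text (find_next_segment text)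

-- ===== LEMMAS AND PROOFS =====

-- offsets of the qualifying lines, the common denominator of both programs
def pvQualOffs : List (List Char) → Int → List Int
  | [], _ => []
  | l :: ls, c => (if pvQual l then [c] else []) ++ pvQualOffs ls (c + (l.length : Int))

def pvPref : Int → List (List Char) → List Int
  | c, [] => [c]
  | c, l :: ls => c :: pvPref (c + (l.length : Int)) ls

theorem pvSegLoop_true (ls : List (List Char)) : ∀ s e : Int,
    pvSegLoop ls s e true =
      (match pvQualOffs ls e with | b :: _ => some (s, b) | [] => none) := by
  induction ls with
  | nil => intro s e; rfl
  | cons l ls ih =>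
    intro s e
    by_cases h : pvQual l = true <;> simp [pvSegLoop, pvQualOffs, h, ih]

theorem pvSegLoop_false (ls : List (List Char)) : ∀ c : Int,
    pvSegLoop ls c c false =
      (match pvQualOffs ls c with | a :: b :: _ => some (a, b) | _ => none) := by
  induction ls with
  | nil => intro c; rfl
  | cons l ls ih =>
    intro c
    by_cases h : pvQual l = true
    · simp only [pvSegLoop, pvQualOffs, h, if_true, if_false, Bool.false_eq_true,
        pvSegLoop_true]
      cases pvQualOffs ls (c + (l.length : Int)) <;> simp
    · simp [pvSegLoop, pvQualOffs, h, ih]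

theorem pvOffsets_fold (ls : List (List Char)) : ∀ (acc : List Int) (c : Int),
    acc.getLast? = some c →
    ls.foldl (fun offs l => offs ++ [offs.getLastD 0 + (l.length : Int)]) acc =
      acc.dropLast ++ pvPref c ls := by
  induction ls with
  | nil =>
    intro acc c h
    simp [pvPref]
    exact (List.dropLast_append_getLast? c h).symm
  | cons l ls ih =>
    intro acc c h
    have hD : acc.getLastD 0 = c := by
      cases acc with
      | nil => simp at h
      | cons a t => simp [List.getLastD_eq_getLast?, h]
    simp only [List.foldl_cons, hD]
    rw [ih (acc ++ [c + (l.length : Int)]) (c + (l.length : Int)) (by simp)]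
    conv_lhs => rw [← List.dropLast_append_getLast? c h]
    simp [pvPref]
  
theorem pvZip_filter (ls : List (List Char)) : ∀ c : Int,
    (((pvPref c ls).zip ls).filter (fun p => pvQual p.2)).map Prod.fst =
      pvQualOffs ls c := by
  induction ls with
  | nil => intro c; rfl
  | cons l ls ih =>
    intro c
    by_cases h : pvQual l = true <;>
      simp [pvPref, pvQualOffs, h, ih]

theorem pvAddNL_eq (ls : List (List Char)) :
    (PySem.List.slice ls none (some (-1))).map (fun l => l ++ ['\n'])
      ++ PySem.List.slice ls (some (-1)) none = pvAddNL ls := by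
  simp only [PySem.List.slice_to_neg_one, PySem.List.slice_from_neg_one]
  induction ls with
  | nil => rfl
  | cons l t ih =>
    cases t with
    | nil => rfl
    | cons l' t' =>
      simpa [pvAddNL, List.dropLast_cons₂] using ih

theorem pv_main (L : List (List Char)) :
    pvSegLoop L 0 0 false =
      (match ((( (L.foldl (fun offs l => offs ++ [offs.getLastD 0 + (l.length : Int)]) [(0:Int)]).zip L).filter
          (fun p => pvQual p.2)).map Prod.fst) with
        | a :: b :: _ => some (a, b) | _ => none) := by
  rw [pvSegLoop_false, pvOffsets_fold L [(0:Int)] 0 (by simp)]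
  simp [pvZip_filter]

-- ===== VERDICT (by name: the statement is the Claim_ definition above) =====
theorem find_next_segment_spec : Claim_equal_find_next_segment := by
  intro text _
  unfold Spec_find_next_segment find_next_segment find_next_segment_alt
  simp only [← pvAddNL_eq, List.append_assoc]
  exact pv_main _
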